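-- pv_equiv track=rewrite | github.com/MarciovsRocha/Racioc-nio_Algor-timico | TDE3_alocamento_memoria/alocamentoMemoria.py | desalocMemory
-- ===== SOURCE A (Python) =====
-- def desalocMemory(qtde, posInit: int, memory):
--     count = 0
--     verPos = True
--     for i in range(0,len(memory)):
--         for j in range(0,len(memory[i])):
--             if ((count == posInit) and (verPos == True) ):
--                 count = 0
--                 verPos = False
--             elif ((count < posInit) and (verPos == True)):
--                 count += 1
--             elif ((count <= qtde) and (verPos == False)):
--                 memory[i][j] = False
--                 count += 1
--             elif ((count > qtde) and (verPos == False)):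
--                 return memory
-- ===== SOURCE B (Python) =====
-- # B: closed-form index arithmetic: compute the flat deallocation window once,
-- # rewrite only the rows it overlaps, and reuse every other row unchanged.
-- # Return-value equivalence only: A mutates `memory` in place; B never mutates
-- # its argument and builds its result from shared / fresh rows.
-- def desalocMemory(qtde, posInit: int, memory):
--     total = sum(len(r) for r in memory)
--     end = posInit + 1 + max(qtde + 1, 0)   # first flat index NOT deallocated
--     if posInit < 0 or end >= total:
--         return None
--     out, base = [], 0
--     for row in memory:
--         if end <= base or base + len(row) <= posInit + 1:
--             out.append(row)                # row entirely outside the window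
--         else:
--             out.append([False if posInit < base + j < end else c
--                         for j, c in enumerate(row)])
--         base += len(row)
--     return out
-- ===== Notes on version B (the rewrite author's own statement) =====
-- stated objective: faster
-- what changed: B replaces A's cell-by-cell counting walk over the grid with closed-form index arithmetic: it computes the flat deallocation window [posInit+1, posInit+1+max(qtde+1,0)) once, decides the Some/None answer from the total size, rewrites only the rows the window overlaps and reuses every other row unchanged.
import Mathlib
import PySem

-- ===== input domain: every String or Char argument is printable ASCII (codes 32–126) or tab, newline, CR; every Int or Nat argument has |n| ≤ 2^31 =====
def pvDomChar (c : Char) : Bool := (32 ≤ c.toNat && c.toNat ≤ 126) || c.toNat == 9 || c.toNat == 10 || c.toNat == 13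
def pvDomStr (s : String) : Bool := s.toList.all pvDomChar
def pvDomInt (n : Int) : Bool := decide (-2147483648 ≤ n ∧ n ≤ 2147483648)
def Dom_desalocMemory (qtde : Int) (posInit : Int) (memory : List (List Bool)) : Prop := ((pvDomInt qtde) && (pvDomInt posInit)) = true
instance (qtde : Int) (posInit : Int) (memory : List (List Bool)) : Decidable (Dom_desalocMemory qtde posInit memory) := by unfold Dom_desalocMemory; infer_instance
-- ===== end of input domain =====

-- B replaces A's cell-by-cell counting walk by index arithmetic (one pass over the
-- rows); return-value equivalence only: Python A mutates `memory` in place, B does not.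

-- ===== PORT A =====
-- inner loop over one row: Sum.inl (row', count', verPos') = loop finished,
-- Sum.inr mem-row = `return memory` fired at this cell (row returned as-is from here on)
def pvRowLoopA (qtde : Int) (posInit : Int) : List Bool → Int → Bool → ((List Bool × Int × Bool) ⊕ List Bool)
  | [], count, verPos => Sum.inl ([], count, verPos)
  | x :: xs, count, verPos =>
    if count = posInit ∧ verPos = true then
      match pvRowLoopA qtde posInit xs 0 false with
      | Sum.inl (r, c, v) => Sum.inl (x :: r, c, v)
      | Sum.inr r => Sum.inr (x :: r)
    else if count < posInit ∧ verPos = true then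
      match pvRowLoopA qtde posInit xs (count + 1) verPos with
      | Sum.inl (r, c, v) => Sum.inl (x :: r, c, v)
      | Sum.inr r => Sum.inr (x :: r)
    else if count ≤ qtde ∧ verPos = false then
      match pvRowLoopA qtde posInit xs (count + 1) verPos with
      | Sum.inl (r, c, v) => Sum.inl (false :: r, c, v)
      | Sum.inr r => Sum.inr (false :: r)
    else if qtde < count ∧ verPos = false then
      Sum.inr (x :: xs)
    else
      match pvRowLoopA qtde posInit xs count verPos with
      | Sum.inl (r, c, v) => Sum.inl (x :: r, c, v)
      | Sum.inr r => Sum.inr (x :: r)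

-- outer loop over the rows; `none` = the Python loop ran off the end (implicit None)
def pvMemLoopA (qtde : Int) (posInit : Int) : List (List Bool) → Int → Bool → Option (List (List Bool))
  | [], _, _ => none
  | r :: rs, count, verPos =>
    match pvRowLoopA qtde posInit r count verPos with
    | Sum.inl (r', c', v') =>
      match pvMemLoopA qtde posInit rs c' v' with
      | none => none
      | some m => some (r' :: m)
    | Sum.inr r' => some (r' :: rs)

def desalocMemory (qtde : Int) (posInit : Int) (memory : List (List Bool)) : Option (List (List Bool)) :=
  pvMemLoopA qtde posInit memory 0 true

-- ===== PORT B =====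
def desalocMemory_alt (qtde : Int) (posInit : Int) (memory : List (List Bool)) : Option (List (List Bool)) :=
  let total : Int := (memory.map (fun r => (r.length : Int))).sum
  let stop : Int := posInit + 1 + max (qtde + 1) 0   -- first flat index NOT deallocated
  if posInit < 0 ∨ stop ≥ total then none
  else
    let f := memory.foldl
      (fun (acc : List (List Bool) × Int) row =>
        (acc.1 ++ [if stop ≤ acc.2 ∨ acc.2 + (row.length : Int) ≤ posInit + 1 then row
          else (row.zipIdx).map
            (fun cj => if posInit < acc.2 + (cj.2 : Int) ∧ acc.2 + (cj.2 : Int) < stop then false else cj.1)],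
         acc.2 + (row.length : Int)))
      ([], 0)
    some f.1

-- ===== PRECONDITION & SPEC =====
def Spec_desalocMemory (qtde : Int) (posInit : Int) (memory : List (List Bool)) (out : Option (List (List Bool))) : Prop := out = desalocMemory_alt qtde posInit memory
instance (qtde : Int) (posInit : Int) (memory : List (List Bool)) (out : Option (List (List Bool))) : Decidable (Spec_desalocMemory qtde posInit memory out) := by unfold Spec_desalocMemory; infer_instance

-- ===== CLAIM (what is proved, stated in full; the proofs are below) =====
def Claim_equal_desalocMemory : Prop := ∀ (qtde : Int) (posInit : Int) (memory : List (List Bool)), Dom_desalocMemory qtde posInit memory → Spec_desalocMemory qtde posInit memory (desalocMemory qtde posInit memory)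

-- ===== LEMMAS AND PROOFS =====

-- reference marking: cell with flat counter c set to false iff lo < c < hi
def pvMarkRow (lo hi : Int) : List Bool → Int → List Bool
  | [], _ => []
  | x :: xs, c => (if lo < c ∧ c < hi then false else x) :: pvMarkRow lo hi xs (c + 1)

def pvMark (lo hi : Int) : List (List Bool) → Int → List (List Bool)
  | [], _ => []
  | r :: rs, c => pvMarkRow lo hi r c :: pvMark lo hi rs (c + (r.length : Int))

def pvTotal : List (List Bool) → Int
  | [] => 0
  | r :: rs => (r.length : Int) + pvTotal rs

theorem pvTotal_nonneg (mem : List (List Bool)) : 0 ≤ pvTotal mem := by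
  induction mem with
  | nil => simp [pvTotal]
  | cons r rs ih => simp only [pvTotal]; positivity

theorem pvMarkRow_congr (lo hi lo' hi' : Int) (h : ∀ k : Int, (lo < k ∧ k < hi) ↔ (lo' < k ∧ k < hi')) :
    ∀ (row : List Bool) (c : Int), pvMarkRow lo hi row c = pvMarkRow lo' hi' row c := by
  intro row
  induction row with
  | nil => intro c; rfl
  | cons x xs ih => intro c; simp only [pvMarkRow, ih, h c]

theorem pvMark_congr (lo hi lo' hi' : Int) (h : ∀ k : Int, (lo < k ∧ k < hi) ↔ (lo' < k ∧ k < hi')) :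
    ∀ (mem : List (List Bool)) (c : Int), pvMark lo hi mem c = pvMark lo' hi' mem c := by
  intro mem
  induction mem with
  | nil => intro c; rfl
  | cons r rs ih => intro c; simp only [pvMark, ih, pvMarkRow_congr lo hi lo' hi' h]

theorem pvMarkRow_id_le (lo hi : Int) : ∀ (row : List Bool) (c : Int),
    c + (row.length : Int) ≤ lo + 1 → pvMarkRow lo hi row c = row := by
  intro row
  induction row with
  | nil => intro c _; rfl
  | cons x xs ih =>
    intro c h
    simp only [List.length_cons] at h
    have hc : ¬ (lo < c ∧ c < hi) := by
      intro hk; omega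
    simp only [pvMarkRow, if_neg hc, ih (c + 1) (by push_cast at h ⊢; omega)]

theorem pvMarkRow_id_ge (lo hi : Int) : ∀ (row : List Bool) (c : Int),
    hi ≤ c → pvMarkRow lo hi row c = row := by
  intro row
  induction row with
  | nil => intro c _; rfl
  | cons x xs ih =>
    intro c h
    have hc : ¬ (lo < c ∧ c < hi) := by intro hk; omega
    simp only [pvMarkRow, if_neg hc, ih (c + 1) (by omega)]

theorem pvMark_id_ge (lo hi : Int) : ∀ (mem : List (List Bool)) (c : Int),
    hi ≤ c → pvMark lo hi mem c = mem := by
  intro mem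
  induction mem with
  | nil => intro c _; rfl
  | cons r rs ih =>
    intro c h
    simp only [pvMark, pvMarkRow_id_ge lo hi r c h, ih (c + (r.length : Int)) (by omega)]

theorem pvMarkRow_shift (lo hi d : Int) : ∀ (row : List Bool) (c : Int),
    pvMarkRow (lo + d) (hi + d) row (c + d) = pvMarkRow lo hi row c := by
  intro row
  induction row with
  | nil => intro c; rfl
  | cons x xs ih =>
    intro c
    have hiff : (lo + d < c + d ∧ c + d < hi + d) ↔ (lo < c ∧ c < hi) := by omega
    have : c + d + 1 = c + 1 + d := by omega
    simp only [pvMarkRow, hiff, this, ih (c + 1)]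

theorem pvMark_shift (lo hi d : Int) : ∀ (mem : List (List Bool)) (c : Int),
    pvMark (lo + d) (hi + d) mem (c + d) = pvMark lo hi mem c := by
  intro mem
  induction mem with
  | nil => intro c; rfl
  | cons r rs ih =>
    intro c
    have : c + d + (r.length : Int) = c + (r.length : Int) + d := by omega
    simp only [pvMark, pvMarkRow_shift, this, ih (c + (r.length : Int))]

theorem pvMarkRow_split (lo hi : Int) : ∀ (row : List Bool) (n : Nat) (c : Int),
    pvMarkRow lo hi row c =
      pvMarkRow lo hi (row.take n) c ++ pvMarkRow lo hi (row.drop n) (c + (n : Int)) := by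
  intro row
  induction row with
  | nil => intro n c; simp [pvMarkRow]
  | cons x xs ih =>
    intro n c
    cases n with
    | zero => simp [pvMarkRow]
    | succ m =>
      have hc : c + ((m + 1 : Nat) : Int) = c + 1 + (m : Int) := by push_cast; ring
      simp only [List.take_succ_cons, List.drop_succ_cons, pvMarkRow, List.cons_append,
        hc, ih m (c + 1)]

-- phase 2 (verPos = false): cells are freed while count ≤ qtde, early return when count > qtde
theorem rowLoopA_false (qtde posInit lo : Int) : ∀ (row : List Bool) (c : Int), lo < c →
    pvRowLoopA qtde posInit row c false =
      (if max (qtde + 1 - c) 0 < (row.length : Int)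
       then Sum.inr (pvMarkRow lo (qtde + 1) row c)
       else Sum.inl (pvMarkRow lo (qtde + 1) row c, c + (row.length : Int), false)) := by
  intro row
  induction row with
  | nil =>
    intro c _
    have hcond : ¬ (max (qtde + 1 - c) 0 < ((0 : Nat) : Int)) := by omega
    simp [pvRowLoopA, pvMarkRow, hcond]
  | cons x xs ih =>
    intro c hlo
    by_cases hc : c ≤ qtde
    · have h4 : ¬ (qtde < c ∧ false = false) := by omega
      simp only [pvRowLoopA, Bool.false_eq_true, and_false, if_false, eq_self_iff_true,
        and_true, if_pos hc, ih (c + 1) (by omega)]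
      have hmark : pvMarkRow lo (qtde + 1) (x :: xs) c = false :: pvMarkRow lo (qtde + 1) xs (c + 1) := by
        have : lo < c ∧ c < qtde + 1 := by omega
        simp [pvMarkRow, this]
      rw [hmark]
      by_cases hlen : max (qtde + 1 - (c + 1)) 0 < (xs.length : Int)
      · have hlen' : max (qtde + 1 - c) 0 < ((x :: xs).length : Int) := by
          simp only [List.length_cons]; push_cast; omega
        rw [if_pos hlen, if_pos hlen']
      · have hlen' : ¬ (max (qtde + 1 - c) 0 < ((x :: xs).length : Int)) := by
          simp only [List.length_cons]; push_cast at hlen ⊢; omega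
        rw [if_neg hlen, if_neg hlen']
        have hl : c + 1 + (xs.length : Int) = c + ((x :: xs).length : Int) := by
          simp only [List.length_cons]; push_cast; ring
        rw [hl]
    · have hlen' : max (qtde + 1 - c) 0 < ((x :: xs).length : Int) := by
        simp only [List.length_cons]; push_cast; omega
      have hmark : pvMarkRow lo (qtde + 1) (x :: xs) c = x :: xs := by
        exact pvMarkRow_id_ge lo (qtde + 1) (x :: xs) c (by omega)
      simp only [pvRowLoopA, Bool.false_eq_true, and_false, if_false, eq_self_iff_true,
        and_true, if_neg hc, if_pos (show qtde < c by omega), if_pos hlen', hmark]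

theorem memLoopA_false (qtde posInit lo : Int) : ∀ (mem : List (List Bool)) (c : Int), lo < c →
    pvMemLoopA qtde posInit mem c false =
      (if max (qtde + 1 - c) 0 < pvTotal mem
       then some (pvMark lo (qtde + 1) mem c)
       else none) := by
  intro mem
  induction mem with
  | nil =>
    intro c _
    have hcond : ¬ (max (qtde + 1 - c) 0 < pvTotal []) := by simp [pvTotal]
    simp [pvMemLoopA, hcond]
  | cons r rs ih =>
    intro c hlo
    have htot := pvTotal_nonneg rs
    simp only [pvMemLoopA, rowLoopA_false qtde posInit lo r c hlo]
    by_cases hlen : max (qtde + 1 - c) 0 < (r.length : Int)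
    · have hcond : max (qtde + 1 - c) 0 < pvTotal (r :: rs) := by
        simp only [pvTotal]; omega
      have hrs : pvMark lo (qtde + 1) rs (c + (r.length : Int)) = rs :=
        pvMark_id_ge lo (qtde + 1) rs _ (by omega)
      simp [hlen, hcond, pvMark, hrs]
    · simp only [if_neg hlen, ih (c + (r.length : Int)) (by omega)]
      have hiff : (max (qtde + 1 - (c + (r.length : Int))) 0 < pvTotal rs) ↔
          (max (qtde + 1 - c) 0 < pvTotal (r :: rs)) := by
        simp only [pvTotal]; omega
      by_cases hco : max (qtde + 1 - (c + (r.length : Int))) 0 < pvTotal rs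
      · simp [hco, hiff.mp hco, pvMark]
      · simp [hco, (not_iff_not.mpr hiff).mp hco]

-- posInit already passed (only possible when posInit < 0): nothing ever happens
theorem rowLoopA_neg (qtde posInit : Int) : ∀ (row : List Bool) (c : Int), posInit < c →
    pvRowLoopA qtde posInit row c true = Sum.inl (row, c, true) := by
  intro row
  induction row with
  | nil => intro c _; rfl
  | cons x xs ih =>
    intro c h
    simp only [pvRowLoopA, Bool.true_eq_false, and_false, if_false, and_true,
      if_neg (show ¬ c = posInit by omega), if_neg (show ¬ c < posInit by omega), ih c h]

theorem memLoopA_neg (qtde posInit : Int) : ∀ (mem : List (List Bool)) (c : Int), posInit < c →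
    pvMemLoopA qtde posInit mem c true = none := by
  intro mem
  induction mem with
  | nil => intro c _; rfl
  | cons r rs ih =>
    intro c h
    simp only [pvMemLoopA, rowLoopA_neg qtde posInit r c h, ih c h]

-- phase 1 (verPos = true): cells pass by unchanged until count reaches posInit inside the row,
-- then the row's tail is processed in phase 2 starting from count 0
theorem rowLoopA_true (qtde posInit : Int) : ∀ (row : List Bool) (c : Int), 0 ≤ c → c ≤ posInit →
    pvRowLoopA qtde posInit row c true =
      (if posInit - c < (row.length : Int) then
        (match pvRowLoopA qtde posInit (row.drop (posInit - c + 1).toNat) 0 false with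
         | Sum.inl (r, c', v) => Sum.inl (row.take (posInit - c + 1).toNat ++ r, c', v)
         | Sum.inr r => Sum.inr (row.take (posInit - c + 1).toNat ++ r))
      else Sum.inl (row, c + (row.length : Int), true)) := by
  intro row
  induction row with
  | nil =>
    intro c h0 hle
    have hcond : ¬ (posInit - c < ((0 : Nat) : Int)) := by omega
    simp [pvRowLoopA, hcond]
    omega
  | cons x xs ih =>
    intro c h0 hle
    by_cases hceq : c = posInit
    · have hcond : posInit - c < ((x :: xs).length : Int) := by
        simp only [List.length_cons]; push_cast; omega
      have ht : (posInit - c + 1).toNat = 1 := by omega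
      simp only [pvRowLoopA, and_true, if_pos hceq, if_pos hcond, ht, List.take_succ_cons,
        List.take_zero, List.drop_succ_cons, List.drop_zero]
      cases hres : pvRowLoopA qtde posInit xs 0 false with
      | inl t => rcases t with ⟨r, c', v⟩; simp [hres]
      | inr r => simp [hres]
    · have hlt : c < posInit := by omega
      have hm : (posInit - c + 1).toNat = (posInit - (c + 1) + 1).toNat + 1 := by omega
      simp only [pvRowLoopA, and_true, if_pos, if_neg (show ¬ c = posInit from hceq),
        if_pos hlt, Bool.true_eq_false, and_false, if_false,
        ih (c + 1) (by omega) (by omega), hm, List.take_succ_cons, List.drop_succ_cons]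
      by_cases hsw : posInit - (c + 1) < (xs.length : Int)
      · have hsw' : posInit - c < ((x :: xs).length : Int) := by
          simp only [List.length_cons]; push_cast; omega
        rw [if_pos hsw, if_pos hsw']
        cases hres : pvRowLoopA qtde posInit (xs.drop (posInit - (c + 1) + 1).toNat) 0 false with
        | inl t => rcases t with ⟨r, c', v⟩; simp
        | inr r => simp
      · have hsw' : ¬ (posInit - c < ((x :: xs).length : Int)) := by
          simp only [List.length_cons]; push_cast at hsw ⊢; omega
        rw [if_neg hsw, if_neg hsw']
        have hl : c + 1 + (xs.length : Int) = c + ((x :: xs).length : Int) := by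
          simp only [List.length_cons]; push_cast; ring
        rw [hl]

theorem memLoopA_true (qtde posInit : Int) : ∀ (mem : List (List Bool)) (c : Int), 0 ≤ c → c ≤ posInit →
    pvMemLoopA qtde posInit mem c true =
      (if posInit + 1 + max (qtde + 1) 0 - c < pvTotal mem
       then some (pvMark posInit (posInit + qtde + 2) mem c)
       else none) := by
  intro mem
  induction mem with
  | nil =>
    intro c h0 hle
    have hcond : ¬ (posInit + 1 + max (qtde + 1) 0 - c < pvTotal []) := by
      simp only [pvTotal]; omega
    simp [pvMemLoopA, hcond]
  | cons r rs ih =>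
    intro c h0 hle
    have htot := pvTotal_nonneg rs
    simp only [pvMemLoopA, rowLoopA_true qtde posInit r c h0 hle]
    by_cases hsw : posInit - c < (r.length : Int)
    · -- the switch happens inside this row
      have hn : (((posInit - c + 1).toNat : Nat) : Int) = posInit - c + 1 := by omega
      have hrest : ((r.drop (posInit - c + 1).toNat).length : Int)
          = (r.length : Int) - (posInit - c + 1) := by
        simp only [List.length_drop]; omega
      have htake : ((r.take (posInit - c + 1).toNat).length : Int) = posInit - c + 1 := by
        simp only [List.length_take]; omega
      simp only [if_pos hsw,
        rowLoopA_false qtde posInit (-1) (r.drop (posInit - c + 1).toNat) 0 (by omega)]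
      have hsplit : pvMarkRow posInit (posInit + qtde + 2) r c
          = r.take (posInit - c + 1).toNat
            ++ pvMarkRow (-1) (qtde + 1) (r.drop (posInit - c + 1).toNat) 0 := by
        rw [pvMarkRow_split posInit (posInit + qtde + 2) r (posInit - c + 1).toNat c]
        congr 1
        · exact pvMarkRow_id_le _ _ _ _ (by rw [htake]; omega)
        · have h := pvMarkRow_shift (-1) (qtde + 1) (posInit + 1)
            (r.drop (posInit - c + 1).toNat) 0
          have e1 : (-1 : Int) + (posInit + 1) = posInit := by ring
          have e2 : qtde + 1 + (posInit + 1) = posInit + qtde + 2 := by ring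
          have e3 : (0 : Int) + (posInit + 1) = c + ((posInit - c + 1).toNat : Int) := by omega
          rw [e1, e2, e3] at h
          exact h
      by_cases hin : max (qtde + 1 - 0) 0 < ((r.drop (posInit - c + 1).toNat).length : Int)
      · -- early return inside this row
        simp only [if_pos hin]
        have hcond : posInit + 1 + max (qtde + 1) 0 - c < pvTotal (r :: rs) := by
          simp only [pvTotal]; omega
        have hrs : pvMark posInit (posInit + qtde + 2) rs (c + (r.length : Int)) = rs :=
          pvMark_id_ge _ _ _ _ (by omega)
        simp only [if_pos hcond, pvMark, hrs, hsplit]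
      · -- the row is exhausted in phase 2; continue with the remaining rows
        simp only [if_neg hin,
          memLoopA_false qtde posInit (-1) rs (0 + ((r.drop (posInit - c + 1).toNat).length : Int)) (by omega)]
        have hshift : pvMark posInit (posInit + qtde + 2) rs (c + (r.length : Int))
            = pvMark (-1) (qtde + 1) rs (0 + ((r.drop (posInit - c + 1).toNat).length : Int)) := by
          have h := pvMark_shift (-1) (qtde + 1) (posInit + 1) rs
            (0 + ((r.drop (posInit - c + 1).toNat).length : Int))
          have e1 : (-1 : Int) + (posInit + 1) = posInit := by ring
          have e2 : qtde + 1 + (posInit + 1) = posInit + qtde + 2 := by ring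
          have e3 : 0 + ((r.drop (posInit - c + 1).toNat).length : Int) + (posInit + 1)
              = c + (r.length : Int) := by omega
          rw [e1, e2, e3] at h
          exact h
        by_cases hco : max (qtde + 1 - (0 + ((r.drop (posInit - c + 1).toNat).length : Int))) 0 < pvTotal rs
        · have hcond : posInit + 1 + max (qtde + 1) 0 - c < pvTotal (r :: rs) := by
            simp only [pvTotal]; omega
          simp only [if_pos hco, if_pos hcond, pvMark, hsplit, hshift]
        · have hcond : ¬ (posInit + 1 + max (qtde + 1) 0 - c < pvTotal (r :: rs)) := by
            simp only [pvTotal]; omega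
          simp only [if_neg hco, if_neg hcond]
    · -- whole row still in phase 1
      simp only [if_neg hsw, ih (c + (r.length : Int)) (by omega) (by omega)]
      have hr : pvMarkRow posInit (posInit + qtde + 2) r c = r :=
        pvMarkRow_id_le _ _ _ _ (by omega)
      by_cases hco : posInit + 1 + max (qtde + 1) 0 - (c + (r.length : Int)) < pvTotal rs
      · have hcond : posInit + 1 + max (qtde + 1) 0 - c < pvTotal (r :: rs) := by
          simp only [pvTotal]; omega
        simp only [if_pos hco, if_pos hcond, pvMark, hr]
      · have hcond : ¬ (posInit + 1 + max (qtde + 1) 0 - c < pvTotal (r :: rs)) := by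
          simp only [pvTotal]; omega
        simp only [if_neg hco, if_neg hcond]

theorem pvSumLens : ∀ (mem : List (List Bool)),
    ((mem.map (fun r => ((r.length : Int)))).sum) = pvTotal mem := by
  intro mem
  induction mem with
  | nil => rfl
  | cons r rs ih => simp [pvTotal, ih]

theorem pvZipMark (posInit stop : Int) : ∀ (row : List Bool) (base : Int) (n : Nat),
    ((row.zipIdx n).map
      (fun cj => if posInit < base + (cj.2 : Int) ∧ base + (cj.2 : Int) < stop then false else cj.1))
      = pvMarkRow posInit stop row (base + (n : Int)) := by
  intro row
  induction row with
  | nil => intro base n; rfl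
  | cons x xs ih =>
    intro base n
    have hc : base + ((n + 1 : Nat) : Int) = base + (n : Int) + 1 := by push_cast; ring
    simp only [List.zipIdx_cons, List.map_cons, pvMarkRow, ih base (n + 1), hc]

theorem pvFoldMark (posInit stop : Int) : ∀ (mem : List (List Bool)) (acc : List (List Bool)) (base : Int),
    (mem.foldl
      (fun (acc : List (List Bool) × Int) row =>
        (acc.1 ++ [if stop ≤ acc.2 ∨ acc.2 + (row.length : Int) ≤ posInit + 1 then row
          else (row.zipIdx).map
            (fun cj => if posInit < acc.2 + (cj.2 : Int) ∧ acc.2 + (cj.2 : Int) < stop then false else cj.1)],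
         acc.2 + (row.length : Int)))
      (acc, base)).1 = acc ++ pvMark posInit stop mem base := by
  intro mem
  induction mem with
  | nil => intro acc base; simp [pvMark]
  | cons r rs ih =>
    intro acc base
    have hrow : (if stop ≤ base ∨ base + (r.length : Int) ≤ posInit + 1 then r
        else (r.zipIdx).map
          (fun cj => if posInit < base + (cj.2 : Int) ∧ base + (cj.2 : Int) < stop then false else cj.1))
        = pvMarkRow posInit stop r base := by
      by_cases hg : stop ≤ base ∨ base + (r.length : Int) ≤ posInit + 1
      · rw [if_pos hg]
        rcases hg with hg | hg
        · exact (pvMarkRow_id_ge posInit stop r base hg).symm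
        · exact (pvMarkRow_id_le posInit stop r base hg).symm
      · rw [if_neg hg]
        have hz := pvZipMark posInit stop r base 0
        simp only [Int.natCast_zero, add_zero] at hz
        exact hz
    simp only [List.foldl_cons, hrow, ih (acc ++ [pvMarkRow posInit stop r base])
      (base + (r.length : Int)), pvMark]
    simp

-- ===== VERDICT (by name: the statement is the Claim_ definition above) =====
theorem desalocMemory_spec : Claim_equal_desalocMemory := by
  intro qtde posInit memory _
  unfold Spec_desalocMemory desalocMemory desalocMemory_alt
  simp only [pvSumLens]
  by_cases hneg : posInit < 0
  · rw [memLoopA_neg qtde posInit memory 0 hneg, if_pos (Or.inl hneg)]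
  · have htot := pvTotal_nonneg memory
    rw [memLoopA_true qtde posInit memory 0 le_rfl (by omega)]
    by_cases hc : posInit + 1 + max (qtde + 1) 0 - 0 < pvTotal memory
    · rw [if_pos hc, if_neg (by push_neg; constructor <;> omega)]
      rw [pvFoldMark posInit (posInit + 1 + max (qtde + 1) 0) memory [] 0]
      rw [List.nil_append]
      exact congrArg some
        (pvMark_congr posInit (posInit + qtde + 2) posInit (posInit + 1 + max (qtde + 1) 0)
          (fun k => by omega) memory 0)
    · rw [if_neg hc, if_pos (Or.inr (by omega))]
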